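-- pv_equiv track=rewrite | github.com/RajaYehia/QuantumCity | Functions.py | Sifting
-- ===== SOURCE A (Python) =====
-- def Sifting(Lalice, Lbob):
--     #Function to get the number of matching received qubit. If BB84 then the resulting list contains the qubits
--     # that were sent and measured in the same basis. If EPR then the resulting list contains the qubit measured
--     # by Alice and Bob that came from the same EPR pair
--     Lres = []
--     for i in range(len(Lalice)):
--         ta, ma = Lalice[i]
--         for j in range(len(Lbob)):
--             tb, mb = Lbob[j]
--             if ta == tb:
--                 Lres.append((ma,mb))
--
--     return Lres
-- ===== SOURCE B (Python) =====
-- def Sifting(Lalice, Lbob):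
--     groups = {}
--     for tb, mb in Lbob:
--         groups.setdefault(tb, []).append(mb)
--     return [(ma, mb) for ta, ma in Lalice for mb in groups.get(ta, [])]
-- ===== Notes on version B (the rewrite author's own statement) =====
-- stated objective: faster
-- what changed: Replaces the nested scan of Bob's list per Alice item with a hash join: Bob's measurements are grouped by tag into a dict once, then each Alice item does one dict lookup.
import Mathlib
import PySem

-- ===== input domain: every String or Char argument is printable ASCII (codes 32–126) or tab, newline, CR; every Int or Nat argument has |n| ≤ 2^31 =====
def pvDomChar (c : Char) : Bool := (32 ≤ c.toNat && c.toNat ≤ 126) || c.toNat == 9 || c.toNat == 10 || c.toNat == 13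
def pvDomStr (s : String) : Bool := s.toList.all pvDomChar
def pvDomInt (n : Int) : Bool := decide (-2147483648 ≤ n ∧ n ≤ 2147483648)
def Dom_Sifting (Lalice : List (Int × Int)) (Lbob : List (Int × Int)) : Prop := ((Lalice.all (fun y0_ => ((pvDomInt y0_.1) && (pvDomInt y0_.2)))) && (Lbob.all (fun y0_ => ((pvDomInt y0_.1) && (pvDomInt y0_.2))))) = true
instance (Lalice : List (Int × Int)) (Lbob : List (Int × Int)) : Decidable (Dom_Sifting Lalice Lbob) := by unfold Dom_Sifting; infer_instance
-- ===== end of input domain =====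

-- B replaces A's nested scan of Lbob per Alice item with a hash join (group Bob by tag once, then one lookup per Alice item): asymptotically faster, same output.


-- ===== PORT A =====
-- nested loops: for each Alice item scan all of Lbob, appending (ma, mb) on tag match
def Sifting (Lalice : List (Int × Int)) (Lbob : List (Int × Int)) : List (Int × Int) :=
  Lalice.foldl (fun acc p =>
    Lbob.foldl (fun acc2 q => if p.1 == q.1 then acc2 ++ [(p.2, q.2)] else acc2) acc) []

-- ===== PORT B =====
-- groups = {}; for tb, mb in Lbob: groups.setdefault(tb, []).append(mb)
def pvGroups_Sifting (Lbob : List (Int × Int)) : PySem.Dict Int (List Int) :=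
  Lbob.foldl (fun d q => d.insert q.1 (d.getD q.1 [] ++ [q.2])) PySem.Dict.empty

-- [(ma, mb) for ta, ma in Lalice for mb in groups.get(ta, [])]
def Sifting_alt (Lalice : List (Int × Int)) (Lbob : List (Int × Int)) : List (Int × Int) :=
  Lalice.flatMap (fun p => ((pvGroups_Sifting Lbob).getD p.1 []).map (fun mb => (p.2, mb)))

-- ===== PRECONDITION & SPEC =====
def Spec_Sifting (Lalice : List (Int × Int)) (Lbob : List (Int × Int)) (out : List (Int × Int)) : Prop := out = Sifting_alt Lalice Lbob
instance (Lalice : List (Int × Int)) (Lbob : List (Int × Int)) (out : List (Int × Int)) : Decidable (Spec_Sifting Lalice Lbob out) := by unfold Spec_Sifting; infer_instance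

-- ===== CLAIM (what is proved, stated in full; the proofs are below) =====
def Claim_equal_Sifting : Prop := ∀ (Lalice : List (Int × Int)) (Lbob : List (Int × Int)), Dom_Sifting Lalice Lbob → Spec_Sifting Lalice Lbob (Sifting Lalice Lbob)

-- ===== LEMMAS AND PROOFS =====

-- the grouping dict's entry at t is exactly Bob's measurements whose tag equals t, in order
theorem pvGroups_getD (L : List (Int × Int)) (d : PySem.Dict Int (List Int)) (t : Int) :
    (L.foldl (fun d q => d.insert q.1 (d.getD q.1 [] ++ [q.2])) d).getD t []
      = d.getD t [] ++ (L.filter (fun q => q.1 == t)).map (·.2) := by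
  induction L generalizing d with
  | nil => simp
  | cons q L ih =>
    simp only [List.foldl_cons, List.filter_cons]
    rw [ih]
    by_cases h : q.1 = t
    · simp [h]
    · simp [PySem.Dict.getD_insert, h, Ne.symm h]

-- A's outer loop as a flatMap of its inner loop's contribution
theorem Sifting_foldl_eq (Lbob : List (Int × Int)) :
    ∀ (La : List (Int × Int)) (acc : List (Int × Int)),
      La.foldl (fun acc p =>
          Lbob.foldl (fun acc2 q => if p.1 == q.1 then acc2 ++ [(p.2, q.2)] else acc2) acc) acc
        = acc ++ La.flatMap (fun p => (Lbob.filter (fun q => p.1 == q.1)).map (fun q => (p.2, q.2))) := by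
  intro La
  induction La with
  | nil => simp
  | cons p La ih =>
    intro acc
    simp only [List.foldl_cons, List.flatMap_cons]
    rw [PySem.List.foldl_append_if, ih, List.append_assoc]

theorem Sifting_spec : Claim_equal_Sifting := by
  intro Lalice Lbob _
  unfold Spec_Sifting Sifting Sifting_alt pvGroups_Sifting
  rw [Sifting_foldl_eq, List.nil_append]
  apply List.flatMap_congr
  intro p _
  rw [pvGroups_getD, PySem.Dict.getD_empty, List.nil_append, List.map_map]
  have hf : (fun (q : Int × Int) => p.1 == q.1) = (fun q => q.1 == p.1) := by
    funext q; simp [eq_comm]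
  rw [hf]
  rfl
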